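-- pv_equiv track=rewrite | github.com/ToropovDev/TinkoffAlgorithmsAndDataStructures | Contest 6 - Графы 1/C.py | is_top_sort
-- ===== SOURCE A (Python) =====
-- def is_top_sort(n, connect_list, perm):
--     peak_degrees = [0] * (n + 1)
--
--     for u in range(1, n + 1):
--         for v in connect_list[u]:
--             peak_degrees[v] += 1
--
--     for i in range(n):
--         if peak_degrees[perm[i]] != 0:
--             return "NO"
--         for v in connect_list[perm[i]]:
--             peak_degrees[v] -= 1
--
--     return "YES"
-- ===== SOURCE B (Python) =====
-- def is_top_sort(n, connect_list, perm):
--     pos = {v: i for i, v in enumerate(perm)}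
--     for u in range(1, n + 1):
--         for v in connect_list[u]:
--             if pos[u] >= pos[v]:
--                 return "NO"
--     return "YES"
-- ===== Notes on version B (the rewrite author's own statement) =====
-- stated objective: simpler
-- what changed: Replaces the in-degree counting array and its step-by-step decrement simulation with a position index built once from perm, then a single sweep over all edges checking pos[u] < pos[v].
-- outside the precondition, e.g. on is_top_sort(1, [[], [0]], [1]): A returns 'YES', B raises KeyError; on is_top_sort(2, [[], [2], []], [1, 1]): A returns 'YES', B raises KeyError
import Mathlib
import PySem

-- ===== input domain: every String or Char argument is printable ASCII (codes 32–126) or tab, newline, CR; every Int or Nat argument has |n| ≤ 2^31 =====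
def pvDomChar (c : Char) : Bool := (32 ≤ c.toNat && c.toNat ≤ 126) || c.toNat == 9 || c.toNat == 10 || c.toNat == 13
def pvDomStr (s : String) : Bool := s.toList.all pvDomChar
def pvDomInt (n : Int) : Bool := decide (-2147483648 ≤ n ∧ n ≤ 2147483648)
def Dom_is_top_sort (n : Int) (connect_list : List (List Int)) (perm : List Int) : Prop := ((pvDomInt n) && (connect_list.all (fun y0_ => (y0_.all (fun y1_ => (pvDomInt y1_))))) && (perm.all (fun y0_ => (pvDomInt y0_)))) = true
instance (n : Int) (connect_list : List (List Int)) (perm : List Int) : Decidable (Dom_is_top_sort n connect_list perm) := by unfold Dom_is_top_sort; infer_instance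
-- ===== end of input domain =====

-- B replaces A's in-degree array simulation by a position index and one sweep over the edges
-- checking pos[u] < pos[v] (objective: simpler).

-- ===== PORT A =====
-- connect_list[u] (Python raises IndexError out of range; excluded by Pre_, where the lookup succeeds)
def pvAdj (cl : List (List Int)) (u : Int) : List Int := (PySem.List.pyGet? cl u).getD []

-- peak_degrees[v] += d  (Python raises IndexError out of range; excluded by Pre_ — there pySetD/pyGetD are exact)
def pvBump (pd : List Int) (v d : Int) : List Int :=
  PySem.List.pySetD pd v (PySem.List.pyGetD pd v 0 + d)

-- for v in connect_list[p]: peak_degrees[v] += d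
def pvAddAll (pd : List Int) (vs : List Int) (d : Int) : List Int :=
  vs.foldl (fun pd v => pvBump pd v d) pd

-- second loop of A: 'for i in range(n)' reading perm[i] = recursion over the first-n prefix of perm
-- (inside Pre_, perm has length exactly n)
def pvALoop (cl : List (List Int)) (pd : List Int) : List Int → String
  | [] => "YES"
  | p :: rest =>
    if PySem.List.pyGetD pd p 0 ≠ 0 then "NO"
    else pvALoop cl (pvAddAll pd (pvAdj cl p) (-1)) rest

def is_top_sort (n : Int) (connect_list : List (List Int)) (perm : List Int) : String :=
  let pd0 : List Int := List.replicate (n + 1).toNat 0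
  let pd1 := (PySem.List.pyRange 1 (n + 1) 1).foldl
    (fun pd u => pvAddAll pd (pvAdj connect_list u) 1) pd0
  pvALoop connect_list pd1 (PySem.List.slice perm none (some n))

-- ===== PORT B =====
-- pos = {v: i for i, v in enumerate(perm)}
def pvPos (perm : List Int) : PySem.Dict Int Int :=
  (PySem.List.enumerate perm 0).foldl (fun d p => d.insert p.2 p.1) PySem.Dict.empty

-- the two nested loops with early return "NO" ≡ an 'all' over the same edges; pos[u] lookups
-- (KeyError outside Pre_) rendered with default 0 — exact inside Pre_, where every key is present
def is_top_sort_alt (n : Int) (connect_list : List (List Int)) (perm : List Int) : String :=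
  let pos := pvPos perm
  if (PySem.List.pyRange 1 (n + 1) 1).all (fun u =>
       (pvAdj connect_list u).all (fun v => pos.getD u 0 < pos.getD v 0))
  then "YES" else "NO"

-- ===== PRECONDITION & SPEC =====
-- For n ≤ 0 both programs return "YES" on everything, so Pre_ admits it all. For n ≥ 1, Pre_
-- excludes inputs where connect_list or perm is too short (A raises IndexError), and inputs where
-- perm is not a genuine permutation of 1..n or some edge endpoint leaves 1..n: there A's decrement
-- bookkeeping and wraparound indexing still return a value while B's position lookup raises KeyError
-- (see the cited examples).
def Pre_is_top_sort (n : Int) (connect_list : List (List Int)) (perm : List Int) : Prop :=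
  n ≤ 0 ∨
  (0 ≤ n ∧ n + 1 ≤ (connect_list.length : Int) ∧ ((perm.length : Int) = n) ∧ perm.Nodup ∧
   (∀ x ∈ perm, 1 ≤ x ∧ x ≤ n) ∧
   (∀ l ∈ (connect_list.drop 1).take n.toNat, ∀ v ∈ l, 1 ≤ v ∧ v ≤ n))

instance (n : Int) (connect_list : List (List Int)) (perm : List Int) : Decidable (Pre_is_top_sort n connect_list perm) := by
  unfold Pre_is_top_sort; infer_instance

def pvWitness_is_top_sort : Int × List (List Int) × List Int := (2, [[], [2], []], [1, 2])

def Spec_is_top_sort (n : Int) (connect_list : List (List Int)) (perm : List Int) (out : String) : Prop := out = is_top_sort_alt n connect_list perm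
instance (n : Int) (connect_list : List (List Int)) (perm : List Int) (out : String) : Decidable (Spec_is_top_sort n connect_list perm out) := by unfold Spec_is_top_sort; infer_instance

-- ===== CLAIM (what is proved, stated in full; the proofs are below) =====
def Claim_equal_is_top_sort : Prop := ∀ (n : Int) (connect_list : List (List Int)) (perm : List Int), Dom_is_top_sort n connect_list perm → Pre_is_top_sort n connect_list perm → Spec_is_top_sort n connect_list perm (is_top_sort n connect_list perm)

-- ===== LEMMAS AND PROOFS =====

lemma pvBump_length (pd : List Int) (v d : Int) : (pvBump pd v d).length = pd.length := by
  simp [pvBump, PySem.List.length_pySetD]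

lemma pvAddAll_length (vs : List Int) (pd : List Int) (d : Int) :
    (pvAddAll pd vs d).length = pd.length := by
  induction vs generalizing pd with
  | nil => rfl
  | cons v vs ih => simp only [pvAddAll, List.foldl_cons] at *; rw [ih, pvBump_length]

lemma pvBump_getD (pd : List Int) (v w d : Int) (hv : 0 ≤ v) (hv2 : v < pd.length)
    (hw : 0 ≤ w) (hw2 : w < pd.length) :
    PySem.List.pyGetD (pvBump pd v d) w 0 =
      if w = v then PySem.List.pyGetD pd w 0 + d else PySem.List.pyGetD pd w 0 := by
  unfold pvBump
  rw [PySem.List.pySetD_of_nonneg _ _ hv]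
  rw [PySem.List.pyGetD_eq_getElem _ _ hw (by simpa using hw2),
      PySem.List.pyGetD_eq_getElem _ _ hw hw2,
      PySem.List.pyGetD_eq_getElem _ _ hv hv2]
  rw [List.getElem_set]
  have hiff : v.toNat = w.toNat ↔ w = v := by omega
  split_ifs <;> simp_all

lemma pvAddAll_getD (n : Int) (vs : List Int) (pd : List Int) (d : Int)
    (hvs : ∀ v ∈ vs, 1 ≤ v ∧ v ≤ n)
    (hlen : (pd.length : Int) = n + 1) (w : Int) (hw : 1 ≤ w) (hw2 : w ≤ n) :
    PySem.List.pyGetD (pvAddAll pd vs d) w 0 =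
      PySem.List.pyGetD pd w 0 + d * (vs.count w : Int) := by
  induction vs generalizing pd with
  | nil => simp [pvAddAll]
  | cons v vs ih =>
    have hv := hvs v (by simp)
    have h1 : PySem.List.pyGetD (pvAddAll (pvBump pd v d) vs d) w 0 =
        PySem.List.pyGetD (pvBump pd v d) w 0 + d * (vs.count w : Int) := by
      apply ih _ (fun x hx => hvs x (by simp [hx]))
      rw [pvBump_length]; exact hlen
    show PySem.List.pyGetD (pvAddAll (pvBump pd v d) vs d) w 0 = _
    rw [h1, pvBump_getD pd v w d (by omega) (by omega) (by omega) (by omega)]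
    rw [List.count_cons]
    push_cast
    by_cases h : v = w
    · subst h; simp; ring
    · simp [h, Ne.symm h]

lemma pvFold_length (cl : List (List Int)) (us : List Int) (pd : List Int) :
    ((us.foldl (fun pd u => pvAddAll pd (pvAdj cl u) 1) pd)).length = pd.length := by
  induction us generalizing pd with
  | nil => rfl
  | cons u us ih => simp only [List.foldl_cons]; rw [ih, pvAddAll_length]

lemma pvFold_getD (n : Int) (cl : List (List Int)) (us : List Int) (pd : List Int)
    (hus : ∀ u ∈ us, ∀ v ∈ pvAdj cl u, 1 ≤ v ∧ v ≤ n)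
    (hlen : (pd.length : Int) = n + 1) (w : Int) (hw : 1 ≤ w) (hw2 : w ≤ n) :
    PySem.List.pyGetD (us.foldl (fun pd u => pvAddAll pd (pvAdj cl u) 1) pd) w 0 =
      PySem.List.pyGetD pd w 0 + ((us.map (fun u => ((pvAdj cl u).count w : Int))).sum) := by
  induction us generalizing pd with
  | nil => simp
  | cons u us ih =>
    simp only [List.foldl_cons, List.map_cons, List.sum_cons]
    rw [ih _ (fun x hx => hus x (by simp [hx])) (by rw [pvAddAll_length]; exact hlen)]
    rw [pvAddAll_getD n _ _ _ (hus u (by simp)) hlen w hw hw2]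
    ring

lemma pvReplicate_getD (k : Nat) (w : Int) :
    PySem.List.pyGetD (List.replicate k (0 : Int)) w 0 = 0 := by
  show (PySem.List.pyGet? (List.replicate k (0 : Int)) w).getD 0 = 0
  rcases h : PySem.List.pyGet? (List.replicate k (0 : Int)) w with _ | x
  · rfl
  · have := PySem.List.mem_of_pyGet?_eq_some _ h
    simp [List.eq_of_mem_replicate this]

-- A's simulation accepts the remaining vertices iff each of them, when popped, has no
-- incoming edge from itself or a later one
def pvOk (cl : List (List Int)) : List Int → Prop
  | [] => True
  | p :: rest => (∀ u ∈ p :: rest, p ∉ pvAdj cl u) ∧ pvOk cl rest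

lemma pvSum_counts_eq_zero_iff (cl : List (List Int)) (l : List Int) (p : Int) :
    ((l.map (fun u => ((pvAdj cl u).count p : Int))).sum = 0 ↔ ∀ u ∈ l, p ∉ pvAdj cl u) := by
  have h1 : (l.map (fun u => ((pvAdj cl u).count p : Int))).sum
      = (((l.map (fun u => (pvAdj cl u).count p)).sum : Nat) : Int) := by
    rw [Nat.cast_list_sum, List.map_map]; rfl
  rw [h1]
  rw [show (((l.map (fun u => (pvAdj cl u).count p)).sum : Nat) : Int) = 0 ↔
      (l.map (fun u => (pvAdj cl u).count p)).sum = 0 by exact_mod_cast Iff.rfl]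
  rw [List.sum_eq_zero_iff]
  constructor
  · intro h u hu
    have := h _ (List.mem_map_of_mem hu)
    exact List.count_eq_zero.mp this
  · intro h x hx
    obtain ⟨u, hu, rfl⟩ := List.mem_map.mp hx
    exact List.count_eq_zero.mpr (h u hu)

lemma pvALoop_yes (n : Int) (cl : List (List Int)) (rest : List Int) (pd : List Int)
    (hlen : (pd.length : Int) = n + 1)
    (hrest : ∀ u ∈ rest, 1 ≤ u ∧ u ≤ n)
    (hedge : ∀ u : Int, 1 ≤ u → u ≤ n → ∀ v ∈ pvAdj cl u, 1 ≤ v ∧ v ≤ n)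
    (hinv : ∀ w : Int, 1 ≤ w → w ≤ n →
      PySem.List.pyGetD pd w 0 = ((rest.map (fun u => ((pvAdj cl u).count w : Int))).sum)) :
    (pvALoop cl pd rest = "YES" ↔ pvOk cl rest) := by
  induction rest generalizing pd with
  | nil => simp [pvALoop, pvOk]
  | cons p rest ih =>
    have hp := hrest p (by simp)
    have hpd := hinv p hp.1 hp.2
    by_cases hz : PySem.List.pyGetD pd p 0 = 0
    · have hclause : ∀ u ∈ p :: rest, p ∉ pvAdj cl u :=
        (pvSum_counts_eq_zero_iff cl (p :: rest) p).mp (by rw [← hpd]; exact hz)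
      have hstep : pvALoop cl pd (p :: rest) = pvALoop cl (pvAddAll pd (pvAdj cl p) (-1)) rest := by
        simp [pvALoop, hz]
      rw [hstep]
      rw [ih (pvAddAll pd (pvAdj cl p) (-1))
        (by rw [pvAddAll_length]; exact hlen)
        (fun u hu => hrest u (by simp [hu]))
        (fun w hw1 hw2 => by
          rw [pvAddAll_getD n _ _ _ (hedge p hp.1 hp.2) hlen w hw1 hw2]
          rw [hinv w hw1 hw2]
          simp only [List.map_cons, List.sum_cons]
          ring)]
      show pvOk cl rest ↔ pvOk cl (p :: rest)
      constructor
      · exact fun h => ⟨hclause, h⟩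
      · exact fun h => h.2
    · have : pvALoop cl pd (p :: rest) = "NO" := by simp [pvALoop, hz]
      rw [this]
      simp only [show ("NO" : String) ≠ "YES" from by decide, false_iff]
      intro hok
      exact hz (by
        rw [hpd]
        exact (pvSum_counts_eq_zero_iff cl (p :: rest) p).mpr hok.1)

lemma pvALoop_cases (cl : List (List Int)) (rest : List Int) (pd : List Int) :
    pvALoop cl pd rest = "YES" ∨ pvALoop cl pd rest = "NO" := by
  induction rest generalizing pd with
  | nil => left; rfl
  | cons p rest ih =>
    by_cases hz : PySem.List.pyGetD pd p 0 = 0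
    · simpa [pvALoop, hz] using ih (pvAddAll pd (pvAdj cl p) (-1))
    · right; simp [pvALoop, hz]

lemma pvOk_iff_idx (cl : List (List Int)) (l : List Int) (hnd : l.Nodup)
    (hcl : ∀ u ∈ l, ∀ v ∈ pvAdj cl u, v ∈ l) :
    (pvOk cl l ↔ ∀ u ∈ l, ∀ v ∈ pvAdj cl u, l.idxOf u < l.idxOf v) := by
  induction l with
  | nil => simp [pvOk]
  | cons p rest ih =>
    have hndr : rest.Nodup := hnd.of_cons
    have hpnotin : p ∉ rest := (List.nodup_cons.mp hnd).1
    constructor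
    · rintro ⟨h1, h2⟩ u hu v hv
      have hvin : v ∈ p :: rest := hcl u hu v hv
      have hvne : v ≠ p := fun he => h1 u hu (he ▸ hv)
      have hvr : v ∈ rest := (List.mem_cons.mp hvin).resolve_left hvne
      have hidxv : (p :: rest).idxOf v = (rest.idxOf v) + 1 := List.idxOf_cons_ne _ (Ne.symm hvne)
      rcases List.mem_cons.mp hu with hup | hur
      · rw [hup, List.idxOf_cons_self, hidxv]; omega
      · have hune : u ≠ p := fun he => hpnotin (he ▸ hur)
        have hclr : ∀ x ∈ rest, ∀ y ∈ pvAdj cl x, y ∈ rest := by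
          intro x hx y hy
          have : y ∈ p :: rest := hcl x (by simp [hx]) y hy
          have hyne : y ≠ p := fun he => h1 x (by simp [hx]) (he ▸ hy)
          exact (List.mem_cons.mp this).resolve_left hyne
        have := (ih hndr hclr).mp h2 u hur v hv
        rw [List.idxOf_cons_ne _ (Ne.symm hune), hidxv]; omega
    · intro h
      have h1 : ∀ u ∈ p :: rest, p ∉ pvAdj cl u := by
        intro u hu hpin
        have := h u hu p hpin
        rw [List.idxOf_cons_self] at this
        omega
      refine ⟨h1, ?_⟩
      have hclr : ∀ x ∈ rest, ∀ y ∈ pvAdj cl x, y ∈ rest := by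
        intro x hx y hy
        have hxne : x ≠ p := fun he => hpnotin (he ▸ hx)
        have hlt := h x (by simp [hx]) y hy
        rw [List.idxOf_cons_ne _ (Ne.symm hxne)] at hlt
        have hyin : y ∈ p :: rest := hcl x (by simp [hx]) y hy
        rcases List.mem_cons.mp hyin with hyp | hyr
        · exfalso; rw [hyp, List.idxOf_cons_self] at hlt; omega
        · exact hyr
      apply (ih hndr hclr).mpr
      intro u hu v hv
      have := h u (by simp [hu]) v hv
      have hune : u ≠ p := fun he => hpnotin (he ▸ hu)
      have hvr : v ∈ rest := hclr u hu v hv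
      have hvne : v ≠ p := fun he => hpnotin (he ▸ hvr)
      rw [List.idxOf_cons_ne _ (Ne.symm hune), List.idxOf_cons_ne _ (Ne.symm hvne)] at this
      omega

lemma pvPos_aux (l : List Int) (s : Int) (d0 : PySem.Dict Int Int) (hnd : l.Nodup) (x : Int) :
    ((PySem.List.enumerate l s).foldl (fun d p => d.insert p.2 p.1) d0).get? x
      = if x ∈ l then some (s + (l.idxOf x : Int)) else d0.get? x := by
  induction l generalizing s d0 with
  | nil => simp [PySem.List.enumerate_nil]
  | cons a t ih =>
    rw [PySem.List.enumerate_cons]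
    simp only [List.foldl_cons]
    rw [ih (s + 1) (d0.insert a s) hnd.of_cons]
    by_cases hxt : x ∈ t
    · have hxa : x ≠ a := fun he => (List.nodup_cons.mp hnd).1 (he ▸ hxt)
      simp only [hxt, if_true, List.mem_cons, hxa, or_true, if_true]
      rw [List.idxOf_cons_ne _ (Ne.symm hxa)]
      congr 1
      push_cast
      ring
    · simp only [hxt, if_false]
      by_cases hxa : x = a
      · subst hxa
        rw [PySem.Dict.get?_insert_self]
        simp [List.idxOf_cons_self]
      · rw [PySem.Dict.get?_insert_of_ne _ _ hxa]
        simp [hxa, hxt]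

lemma pvPos_getD (perm : List Int) (hnd : perm.Nodup) (x : Int) (hx : x ∈ perm) :
    (pvPos perm).getD x 0 = (perm.idxOf x : Int) := by
  show ((pvPos perm).get? x).getD 0 = _
  unfold pvPos
  rw [pvPos_aux perm 0 PySem.Dict.empty hnd x]
  simp [hx]

lemma pvPerm_range (n : Int) (perm : List Int) (h0 : 0 ≤ n) (hlen : (perm.length : Int) = n)
    (hnd : perm.Nodup) (hmem : ∀ x ∈ perm, 1 ≤ x ∧ x ≤ n) :
    perm.Perm (PySem.List.pyRange 1 (n + 1) 1) := by
  apply List.Subperm.perm_of_length_le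
  · apply hnd.subperm
    intro x hx
    rw [PySem.List.mem_pyRange_one]
    have := hmem x hx
    omega
  · rw [PySem.List.length_pyRange_one]
    omega

lemma pvAddAll_nil (vs : List Int) (d : Int) : pvAddAll [] vs d = [] := by
  have h : (pvAddAll ([] : List Int) vs d).length = 0 := pvAddAll_length vs [] d
  exact List.eq_nil_of_length_eq_zero h

lemma pvALoop_nil_pd (cl : List (List Int)) (l : List Int) : pvALoop cl [] l = "YES" := by
  induction l with
  | nil => rfl
  | cons p rest ih =>
    show (if PySem.List.pyGetD ([] : List Int) p 0 ≠ 0 then "NO"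
          else pvALoop cl (pvAddAll [] (pvAdj cl p) (-1)) rest) = "YES"
    rw [pvAddAll_nil]
    simpa [PySem.List.pyGetD, PySem.List.pyGet?] using ih

lemma pv_nonpos (n : Int) (cl : List (List Int)) (perm : List Int) (hn : n ≤ 0) :
    is_top_sort n cl perm = is_top_sort_alt n cl perm := by
  have hr : PySem.List.pyRange 1 (n + 1) 1 = [] := PySem.List.pyRange_one_eq_nil (by omega)
  have hB : is_top_sort_alt n cl perm = "YES" := by
    show (if ((PySem.List.pyRange 1 (n + 1) 1).all _) = true then "YES" else "NO") = "YES"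
    rw [hr]
    rfl
  rw [hB]
  by_cases h0 : n = 0
  · subst h0
    show pvALoop cl ((PySem.List.pyRange 1 ((0 : Int) + 1) 1).foldl
        (fun pd u => pvAddAll pd (pvAdj cl u) 1) (List.replicate ((0 : Int) + 1).toNat 0))
      (PySem.List.slice perm none (some 0)) = "YES"
    rw [hr, PySem.List.slice_to _ (by omega)]
    rfl
  · show pvALoop cl ((PySem.List.pyRange 1 (n + 1) 1).foldl _ (List.replicate (n + 1).toNat 0)) _ = "YES"
    rw [hr, show (n + 1).toNat = 0 by omega]
    exact pvALoop_nil_pd cl _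

lemma pv_main (n : Int) (cl : List (List Int)) (perm : List Int)
    (hpre : 0 ≤ n ∧ n + 1 ≤ (cl.length : Int) ∧ ((perm.length : Int) = n) ∧ perm.Nodup ∧
      (∀ x ∈ perm, 1 ≤ x ∧ x ≤ n) ∧
      (∀ l ∈ (cl.drop 1).take n.toNat, ∀ v ∈ l, 1 ≤ v ∧ v ≤ n)) :
    is_top_sort n cl perm = is_top_sort_alt n cl perm := by
  obtain ⟨h0, hcllen, hplen, hnd, hmem, hedge0⟩ := hpre
  -- edge endpoints of vertices 1..n lie in 1..n
  have hedge : ∀ u : Int, 1 ≤ u → u ≤ n → ∀ v ∈ pvAdj cl u, 1 ≤ v ∧ v ≤ n := by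
    intro u h1 h2 v hv
    have hu0 : 0 ≤ u := by omega
    have hult : u < (cl.length : Int) := by omega
    have hadj : pvAdj cl u = cl[u.toNat]'(by omega) := by
      unfold pvAdj
      rw [PySem.List.pyGet?_eq_some_getElem _ hu0 hult]
      rfl
    have hk1 : u.toNat - 1 < ((cl.drop 1).take n.toNat).length := by
      simp [List.length_take]
      omega
    have hel : ((cl.drop 1).take n.toNat)[u.toNat - 1]'hk1 = cl[u.toNat]'(by omega) := by
      rw [List.getElem_take, List.getElem_drop]
      congr 1
      omega
    have hmem2 : cl[u.toNat]'(by omega) ∈ (cl.drop 1).take n.toNat := by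
      rw [← hel]; exact List.getElem_mem hk1
    exact hedge0 _ hmem2 v (by rw [hadj] at hv; exact hv)
  have hperm : perm.Perm (PySem.List.pyRange 1 (n + 1) 1) :=
    pvPerm_range n perm h0 hplen hnd hmem
  have hmemperm : ∀ x : Int, 1 ≤ x → x ≤ n → x ∈ perm := by
    intro x hx1 hx2
    rw [hperm.mem_iff, PySem.List.mem_pyRange_one]
    omega
  have hclosed : ∀ u ∈ perm, ∀ v ∈ pvAdj cl u, v ∈ perm := by
    intro u hu v hv
    have hb := hedge u (hmem u hu).1 (hmem u hu).2 v hv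
    exact hmemperm v hb.1 hb.2
  -- the ordering predicate both programs decide
  set P : Prop := ∀ u ∈ perm, ∀ v ∈ pvAdj cl u, perm.idxOf u < perm.idxOf v with hP
  -- A returns "YES" iff P
  have hA : is_top_sort n cl perm =
      pvALoop cl ((PySem.List.pyRange 1 (n + 1) 1).foldl
        (fun pd u => pvAddAll pd (pvAdj cl u) 1) (List.replicate (n + 1).toNat 0)) perm := by
    show pvALoop _ _ (PySem.List.slice perm none (some n)) = _
    rw [PySem.List.slice_to _ h0, List.take_of_length_le (by omega)]
  have hAyes : is_top_sort n cl perm = "YES" ↔ P := by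
    rw [hA]
    rw [pvALoop_yes n cl perm _
      (by rw [pvFold_length]; simp; omega)
      hmem hedge
      (fun w hw1 hw2 => by
        rw [pvFold_getD n cl _ _
          (fun u hu => hedge u (PySem.List.mem_pyRange_one.mp hu).1
            (by have := (PySem.List.mem_pyRange_one.mp hu).2; omega))
          (by simp; omega) w hw1 hw2]
        rw [pvReplicate_getD, zero_add]
        exact (List.Perm.sum_eq (hperm.map _)).symm)]
    exact pvOk_iff_idx cl perm hnd hclosed
  -- B returns "YES" iff P
  have hByes : is_top_sort_alt n cl perm = "YES" ↔ P := by
    show (if _ then "YES" else "NO") = "YES" ↔ P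
    have hcond : ((PySem.List.pyRange 1 (n + 1) 1).all (fun u =>
        (pvAdj cl u).all (fun v =>
          decide ((pvPos perm).getD u 0 < (pvPos perm).getD v 0)))) = true ↔ P := by
      rw [List.all_eq_true]
      constructor
      · intro h u hu v hv
        have hub := hmem u hu
        have hvb := hedge u hub.1 hub.2 v hv
        have hur : u ∈ PySem.List.pyRange 1 (n + 1) 1 := hperm.mem_iff.mp hu
        have := List.all_eq_true.mp (h u hur) v hv
        rw [decide_eq_true_iff] at this
        rw [pvPos_getD perm hnd u hu, pvPos_getD perm hnd v (hmemperm v hvb.1 hvb.2)] at this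
        exact_mod_cast this
      · intro h u hu
        rw [List.all_eq_true]
        intro v hv
        have hub := PySem.List.mem_pyRange_one.mp hu
        have hup : u ∈ perm := hmemperm u hub.1 (by omega)
        have hvb := hedge u hub.1 (by omega) v hv
        rw [decide_eq_true_iff]
        rw [pvPos_getD perm hnd u hup, pvPos_getD perm hnd v (hmemperm v hvb.1 hvb.2)]
        exact_mod_cast h u hup v hv
    by_cases hp : P
    · simp [hcond.mpr hp, hp]
    · have : ¬ _ := fun hc => hp (hcond.mp hc)
      simp only [this, if_false]
      simp only [show ("NO" : String) = "YES" ↔ False from by simp]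
      tauto
  by_cases hp : P
  · rw [hAyes.mpr hp, hByes.mpr hp]
  · have hAno : is_top_sort n cl perm = "NO" := by
      rcases (hA ▸ pvALoop_cases cl perm _ : is_top_sort n cl perm = "YES" ∨ _) with h | h
      · exact absurd (hAyes.mp h) hp
      · exact h
    have hBno : is_top_sort_alt n cl perm = "NO" := by
      by_cases hc : is_top_sort_alt n cl perm = "YES"
      · exact absurd (hByes.mp hc) hp
      · have hrfl : is_top_sort_alt n cl perm =
            (if ((PySem.List.pyRange 1 (n + 1) 1).all (fun u =>
              (pvAdj cl u).all (fun v =>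
                decide ((pvPos perm).getD u 0 < (pvPos perm).getD v 0)))) = true
             then "YES" else "NO") := rfl
        rw [hrfl] at hc ⊢
        split_ifs at hc ⊢ with h
        · exact absurd rfl hc
        · rfl
    rw [hAno, hBno]

-- ===== VERDICT (by name: the statement is the Claim_ definition above) =====
theorem is_top_sort_spec : Claim_equal_is_top_sort := by
  intro n cl perm _ hpre
  rcases hpre with hn | hpre
  · exact pv_nonpos n cl perm hn
  · exact pv_main n cl perm hpre
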